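-- pv_equiv track=rewrite | github.com/m1ha5/sfox_toolkit | tools/oba/sfox_mm.py | build_full_rows
-- ===== SOURCE A (Python) =====
-- def build_full_rows(bips_list):
-- 	"""Return ordered row specs: ('+N'|'-N'|'0', kind, ...) where kind is ask_band|zero|bid_band."""
-- 	pos = sorted({x for x in bips_list if x > 0})
-- 	neg = sorted({x for x in bips_list if x < 0}, key=lambda x: abs(x))  # -1, -5, -10
-- 	has_zero = 0 in bips_list
-- 	rows = []
-- 	# Asks: outer → inner (large +bps first)
-- 	for p in sorted(pos, reverse=True):
-- 		inner = max((x for x in pos if x < p), default=0)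
-- 		rows.append(("ask", p, inner))
-- 	if has_zero:
-- 		rows.append(("zero", 0, 0))
-- 	# Bids: inner → outer (-1 then -5 then -10)
-- 	prev_mag = 0
-- 	for n in neg:
-- 		mag = abs(n)
-- 		rows.append(("bid", mag, prev_mag))
-- 		prev_mag = mag
-- 	return rows
-- ===== SOURCE B (Python) =====
-- def build_full_rows(bips_list):
--     """Return ordered row specs: ('+N'|'-N'|'0', kind, ...) where kind is ask_band|zero|bid_band."""
--     pos = sorted({x for x in bips_list if x > 0})
--     mags = sorted({-x for x in bips_list if x < 0})
--     rows = [("ask", p, q) for p, q in zip(reversed(pos), reversed([0] + pos[:-1]))]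
--     if 0 in bips_list:
--         rows.append(("zero", 0, 0))
--     rows.extend(("bid", m, pm) for m, pm in zip(mags, [0] + mags[:-1]))
--     return rows
-- ===== Notes on version B (the rewrite author's own statement) =====
-- stated objective: faster
-- what changed: B pairs each sorted distinct level with its predecessor by zipping the sorted list against its shifted copy ([0]+xs[:-1]) instead of A's per-element rescan for max-less-than, and sorts the bid magnitudes directly instead of sorting negatives by abs with an accumulator loop.
import Mathlib
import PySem

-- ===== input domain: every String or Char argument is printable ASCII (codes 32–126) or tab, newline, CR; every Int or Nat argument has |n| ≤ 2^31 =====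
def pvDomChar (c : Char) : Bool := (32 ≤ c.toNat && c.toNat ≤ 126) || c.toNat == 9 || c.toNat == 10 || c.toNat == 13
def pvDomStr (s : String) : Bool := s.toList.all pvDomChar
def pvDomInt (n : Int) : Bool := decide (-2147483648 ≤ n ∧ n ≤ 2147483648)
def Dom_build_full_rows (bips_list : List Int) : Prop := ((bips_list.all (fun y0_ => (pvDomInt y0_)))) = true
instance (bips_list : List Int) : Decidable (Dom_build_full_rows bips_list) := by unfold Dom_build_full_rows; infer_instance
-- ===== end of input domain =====

-- B replaces A's quadratic inner max-scan by pairing the sorted distinct levels with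
-- their shifted copy (zip with [0]+xs[:-1]), and sorts bid magnitudes directly.

-- ===== PORT A =====
def build_full_rows (bips_list : List Int) : List (String × Int × Int) :=
  let pos := PySem.List.sorted (PySem.Set.ofList (bips_list.filter (fun x => decide (0 < x)))) (fun x => x)
  let neg := PySem.List.sorted (PySem.Set.ofList (bips_list.filter (fun x => decide (x < 0)))) (fun x => |x|)
  let has_zero := bips_list.contains (0 : Int)
  let rows : List (String × Int × Int) := []
  -- Asks: outer → inner (large +bps first)
  let rows := (PySem.List.sorted pos (fun x => x) true).foldl
    (fun rows p =>
      let inner := PySem.List.maxD (pos.filter (fun x => decide (x < p))) (fun x => x) 0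
      rows ++ [("ask", p, inner)]) rows
  let rows := if has_zero then rows ++ [(("zero" : String), (0 : Int), (0 : Int))] else rows
  -- Bids: inner → outer, prev_mag accumulator
  let st := neg.foldl
    (fun (st : List (String × Int × Int) × Int) n =>
      let mag := |n|
      (st.1 ++ [(("bid" : String), mag, st.2)], mag)) (rows, 0)
  st.1

-- ===== PORT B =====
def build_full_rows_alt (bips_list : List Int) : List (String × Int × Int) :=
  let pos := PySem.List.sorted (PySem.Set.ofList (bips_list.filter (fun x => decide (0 < x)))) (fun x => x)
  let mags := PySem.List.sorted (PySem.Set.ofList ((bips_list.filter (fun x => decide (x < 0))).map (fun x => -x))) (fun x => x)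
  let rows := (pos.reverse.zip (((0 : Int) :: PySem.List.slice pos none (some (-1))).reverse)).map
    (fun pq => (("ask" : String), pq.1, pq.2))
  let rows := if bips_list.contains (0 : Int) then rows ++ [(("zero" : String), (0 : Int), (0 : Int))] else rows
  rows ++ ((mags.zip ((0 : Int) :: PySem.List.slice mags none (some (-1)))).map
    (fun pq => (("bid" : String), pq.1, pq.2)))

-- ===== PRECONDITION & SPEC =====
def Spec_build_full_rows (bips_list : List Int) (out : List (String × Int × Int)) : Prop := out = build_full_rows_alt bips_list
instance (bips_list : List Int) (out : List (String × Int × Int)) : Decidable (Spec_build_full_rows bips_list out) := by unfold Spec_build_full_rows; infer_instance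

-- ===== CLAIM (what is proved, stated in full; the proofs are below) =====
def Claim_equal_build_full_rows : Prop := ∀ (bips_list : List Int), Dom_build_full_rows bips_list → Spec_build_full_rows bips_list (build_full_rows bips_list)

-- ===== LEMMAS AND PROOFS =====

-- strictly increasing list: the elements below l[i] are exactly the first i
theorem pv_filter_lt_eq_take (l : List Int) (hp : l.Pairwise (· < ·)) (i : Nat) (h : i < l.length) :
    l.filter (fun x => decide (x < l[i])) = l.take i := by
  induction l generalizing i with
  | nil => simp at h
  | cons a t ih =>
    rcases List.pairwise_cons.mp hp with ⟨ha, ht⟩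
    cases i with
    | zero =>
      simp only [List.getElem_cons_zero, List.take_zero, List.filter_eq_nil_iff]
      intro x hx
      rcases List.mem_cons.mp hx with rfl | hxt
      · simp
      · simp [not_lt.mpr (le_of_lt (ha x hxt))]
    | succ j =>
      simp only [List.getElem_cons_succ]
      have hj : j < t.length := by simpa using h
      have haj : a < t[j] := ha _ (List.getElem_mem hj)
      rw [List.filter_cons_of_pos (by simp [haj]), List.take_succ_cons]
      exact congrArg (List.cons a) (ih ht j hj)

-- the max of the first i elements of a strictly increasing list
theorem pv_maxD_take (l : List Int) (hp : l.Pairwise (· < ·)) (i : Nat) (h : i < l.length) :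
    PySem.List.maxD (l.take i) (fun x => x) 0 = if i = 0 then 0 else l[i-1]'(by omega) := by
  cases i with
  | zero => simp [PySem.List.maxD, PySem.List.max?]
  | succ j =>
    simp only [Nat.succ_ne_zero, if_false, Nat.add_sub_cancel]
    have hlen : (l.take (j+1)).length = j + 1 := by
      simp only [List.length_take]; omega
    have hne : l.take (j+1) ≠ [] := by
      intro hcon; rw [hcon] at hlen; simp at hlen
    obtain ⟨m, hm⟩ : ∃ m, PySem.List.max? (l.take (j+1)) (fun x => x) = some m := by
      cases hmx : PySem.List.max? (l.take (j+1)) (fun x => x) with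
      | none => exact absurd ((PySem.List.max?_eq_none_iff _ _).mp hmx) hne
      | some m => exact ⟨m, rfl⟩
    have hmem := PySem.List.max?_mem hm
    have hmax := PySem.List.max?_isMax hm
    have hpg := List.pairwise_iff_getElem.mp hp
    -- m = l[k] for some k ≤ j
    obtain ⟨k, hk, hkm⟩ := List.getElem_of_mem hmem
    have hklen : k < j + 1 := by rw [hlen] at hk; omega
    have hkl : k < l.length := by omega
    have hkval : (l.take (j+1))[k] = l[k] := List.getElem_take
    have hjin : l[j] ∈ l.take (j+1) := by
      have hjl : j < (l.take (j+1)).length := by simp [List.length_take]; omega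
      have : (l.take (j+1))[j] = l[j] := List.getElem_take
      rw [← this]; exact List.getElem_mem hjl
    have hle : l[j] ≤ m := hmax _ hjin
    rw [hkval] at hkm
    have hkeq : k = j := by
      by_contra hne'
      have hkj : k < j := by omega
      have : l[k] < l[j] := hpg k j hkl (by omega) hkj
      omega
    subst hkeq
    simp [PySem.List.maxD, hm, ← hkm]

-- core of the asks: max-less-than pairing equals zip with the shifted list
theorem pv_ask_core (l : List Int) (hp : l.Pairwise (· < ·)) :
    l.map (fun p => (("ask" : String), p, PySem.List.maxD (l.filter (fun x => decide (x < p))) (fun x => x) 0))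
      = (l.zip ((0 : Int) :: l.dropLast)).map (fun pq => (("ask" : String), pq.1, pq.2)) := by
  apply List.ext_getElem
  · simp [List.length_zip]
    cases l <;> simp
  · intro i h1 h2
    have hi : i < l.length := by simpa using h1
    simp only [List.getElem_map, List.getElem_zip]
    have hz : ((0 : Int) :: l.dropLast)[i]'(by simp [List.length_zip] at h2; simp; omega) =
        if i = 0 then 0 else l[i-1]'(by omega) := by
      cases i with
      | zero => simp
      | succ j =>
        simp only [List.getElem_cons_succ, Nat.succ_ne_zero, if_false, Nat.add_sub_cancel]
        exact List.getElem_dropLast _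
    rw [pv_filter_lt_eq_take l hp i hi, pv_maxD_take l hp i hi, hz]

-- zip of reverses is the reverse of the zip (equal lengths)
theorem pv_zip_reverse (l m : List Int) (h : l.length = m.length) :
    l.reverse.zip m.reverse = (l.zip m).reverse := by
  apply List.ext_getElem
  · simp [List.length_zip, h]
  · intro i h1 h2
    have hi : i < l.length := by simp [List.length_zip, h] at h1; omega
    simp [List.getElem_zip, List.getElem_reverse, h]

-- the bid loop with its prev accumulator is the zip with the shifted list
theorem pv_bid_core (l : List Int) (acc : List (String × Int × Int)) (prev : Int) :
    (l.foldl (fun (st : List (String × Int × Int) × Int) m =>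
        (st.1 ++ [(("bid" : String), m, st.2)], m)) (acc, prev)).1
      = acc ++ (l.zip (prev :: l.dropLast)).map (fun pq => (("bid" : String), pq.1, pq.2)) := by
  induction l generalizing acc prev with
  | nil => simp
  | cons a t ih =>
    simp only [List.foldl_cons]
    rw [ih]
    cases t with
    | nil => simp
    | cons b t' => simp [List.dropLast_cons₂]

-- set-comprehension with an injected negation: ofList commutes with map (-·)
theorem pv_foldl_add_map_neg (l acc : List Int) :
    (l.map (fun x => -x)).foldl PySem.Set.add (acc.map (fun x => -x))
      = (l.foldl PySem.Set.add acc).map (fun x => -x) := by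
  induction l generalizing acc with
  | nil => simp
  | cons a t ih =>
    simp only [List.map_cons, List.foldl_cons]
    have hadd : PySem.Set.add (acc.map (fun x => -x)) (-a) = (PySem.Set.add acc a).map (fun x => -x) := by
      have hmem : (-a) ∈ acc.map (fun x => -x) ↔ a ∈ acc := List.mem_map_of_injective neg_injective
      by_cases hca : a ∈ acc
      · simp [PySem.Set.add, PySem.Set.contains, List.contains_eq_mem, hca, hmem.mpr hca]
      · simp [PySem.Set.add, PySem.Set.contains, List.contains_eq_mem, hca, hmem]
    rw [hadd, ih]

theorem pv_ofList_map_neg (l : List Int) :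
    PySem.Set.ofList (l.map (fun x => -x)) = (PySem.Set.ofList l).map (fun x => -x) := by
  have := pv_foldl_add_map_neg l []
  simpa [PySem.Set.ofList_eq_foldl] using this

-- A's negatives sorted by |x| are exactly B's sorted magnitudes, negated
theorem pv_neg_eq_map (bips_list : List Int) :
    PySem.List.sorted (PySem.Set.ofList (bips_list.filter (fun x => decide (x < 0)))) (fun x => |x|)
      = (PySem.List.sorted (PySem.Set.ofList ((bips_list.filter (fun x => decide (x < 0))).map (fun x => -x))) (fun x => x)).map (fun m => -m) := by
  set f := bips_list.filter (fun x => decide (x < 0)) with hf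
  set mags := PySem.List.sorted (PySem.Set.ofList (f.map (fun x => -x))) (fun x => x) with hm
  have hpos : ∀ m ∈ mags, 0 < m := by
    intro m hmem
    rw [hm, PySem.List.mem_sorted] at hmem
    have : m ∈ f.map (fun x => -x) := (PySem.Set.mem_ofList _ _).mp hmem
    obtain ⟨x, hx, rfl⟩ := List.mem_map.mp this
    have : x < 0 := by simpa using (List.mem_filter.mp hx).2
    omega
  have hlt : mags.Pairwise (· < ·) := PySem.List.sorted_ofList_pairwise_lt _
  apply PySem.List.sorted_eq_of_perm_of_pairwise_lt
  · have h1 : mags.Perm (PySem.Set.ofList (f.map (fun x => -x))) := PySem.List.sorted_perm _ _ _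
    rw [pv_ofList_map_neg f] at h1
    have h2 := h1.map (fun m : Int => -m)
    simpa [List.map_map, Function.comp] using h2
  · rw [List.pairwise_map]
    refine List.Pairwise.imp_of_mem ?_ hlt
    intro a b ha hb hab
    have h0a := hpos a ha
    have h0b := hpos b hb
    have e1 : |(-a)| = a := by rw [abs_neg, abs_of_pos h0a]
    have e2 : |(-b)| = b := by rw [abs_neg, abs_of_pos h0b]
    rw [e1, e2]; exact hab

-- both programs, unfolded to the same normal form
theorem pv_main (bips_list : List Int) :
    build_full_rows bips_list = build_full_rows_alt bips_list := by
  unfold build_full_rows build_full_rows_alt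
  set pos := PySem.List.sorted (PySem.Set.ofList (bips_list.filter (fun x => decide (0 < x)))) (fun x : Int => x) with hposdef
  set mags := PySem.List.sorted (PySem.Set.ofList ((bips_list.filter (fun x => decide (x < 0))).map (fun x => -x))) (fun x : Int => x) with hmagsdef
  have hppos : pos.Pairwise (· < ·) := PySem.List.sorted_ofList_pairwise_lt _
  have hmlt : mags.Pairwise (· < ·) := PySem.List.sorted_ofList_pairwise_lt _
  have hmpos : ∀ m ∈ mags, 0 ≤ m := by
    intro m hmem
    rw [hmagsdef, PySem.List.mem_sorted] at hmem
    have : m ∈ (bips_list.filter (fun x => decide (x < 0))).map (fun x => -x) := (PySem.Set.mem_ofList _ _).mp hmem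
    obtain ⟨x, hx, rfl⟩ := List.mem_map.mp this
    have : x < 0 := by simpa using (List.mem_filter.mp hx).2
    omega
  -- descending iteration over the already-sorted pos is its reverse
  have hrev : PySem.List.sorted pos (fun x : Int => x) true = pos.reverse := by
    apply PySem.List.sorted_rev_eq_of_perm_of_pairwise_gt
    · exact (List.reverse_perm pos)
    · exact List.pairwise_reverse.mpr hppos
  -- asks
  have hask : (PySem.List.sorted pos (fun x : Int => x) true).foldl
      (fun rows p => rows ++ [(("ask" : String), p,
        PySem.List.maxD (pos.filter (fun x => decide (x < p))) (fun x : Int => x) 0)])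
      ([] : List (String × Int × Int))
      = (pos.reverse.zip (((0 : Int) :: PySem.List.slice pos none (some (-1))).reverse)).map
        (fun pq => (("ask" : String), pq.1, pq.2)) := by
    rw [hrev, PySem.List.foldl_append_singleton_eq_map]
    have h1 : pos.reverse.map (fun p => (("ask" : String), p,
        PySem.List.maxD (pos.filter (fun x => decide (x < p))) (fun x : Int => x) 0))
        = (pos.map (fun p => (("ask" : String), p,
          PySem.List.maxD (pos.filter (fun x => decide (x < p))) (fun x : Int => x) 0))).reverse := by
      simp [List.map_reverse]
    rw [List.nil_append, h1, pv_ask_core pos hppos]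
    rw [PySem.List.slice_to_neg_one]
    cases pos with
    | nil => simp
    | cons a t =>
      rw [pv_zip_reverse _ _ (by simp)]
      simp [List.map_reverse]
  -- bids
  rw [pv_neg_eq_map bips_list, ← hmagsdef]
  simp only [List.foldl_map]
  have hfg : ∀ (acc : List (String × Int × Int) × Int), ∀ m ∈ mags,
      (acc.1 ++ [(("bid" : String), |(-m)|, acc.2)], |(-m)|)
        = (acc.1 ++ [(("bid" : String), m, acc.2)], m) := by
    intro acc m hm
    have := hmpos m hm
    simp [abs_of_nonneg this]
  rw [hask,
    PySem.List.foldl_congr_mem mags _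
      (fun (st : List (String × Int × Int) × Int) m => (st.1 ++ [(("bid" : String), m, st.2)], m)) _ hfg,
    pv_bid_core]
  rw [PySem.List.slice_to_neg_one, PySem.List.slice_to_neg_one]


-- ===== VERDICT (by name: the statement is the Claim_ definition above) =====
theorem build_full_rows_spec : Claim_equal_build_full_rows := by
  intro bips_list _
  unfold Spec_build_full_rows
  exact pv_main bips_list
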